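-- pv_equiv track=rewrite | github.com/JohnReedV/my-subtensor-scripts | neuronreg.py | sat_pow_u64
-- ===== SOURCE A (Python) =====
-- U64_MAX = (1 << 64) - 1
--
-- def sat_mul_u64(a: int, b: int) -> int:
--     a = max(0, int(a))
--     b = max(0, int(b))
--     p = a * b
--     return U64_MAX if p > U64_MAX else p
--
-- def sat_pow_u64(base: int, exp: int) -> int:
--     result = 1
--     factor = max(0, int(base))
--     power = max(0, int(exp))
--     while power > 0:
--         if (power & 1) == 1:
--             result = sat_mul_u64(result, factor)
--         power >>= 1
--         if power > 0:
--             factor = sat_mul_u64(factor, factor)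
--     return result
-- ===== SOURCE B (Python) =====
-- U64_MAX = (1 << 64) - 1
--
-- def sat_pow_u64(base: int, exp: int) -> int:
--     b = max(0, int(base))
--     e = max(0, int(exp))
--     if e == 0:
--         return 1
--     if b <= 1:
--         return b
--     if e >= 64:
--         return U64_MAX
--     return min(b ** e, U64_MAX)
-- ===== Notes on version B (the rewrite author's own statement) =====
-- stated objective: simpler
-- what changed: Replaces the saturating exponentiation-by-squaring loop with a closed form: clamp the operands, answer the three trivial cases (exp 0, base <= 1, base >= 2 with exp >= 64 saturates) directly, otherwise return min(base**exp, U64_MAX) computed by Python's built-in power.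
import Mathlib
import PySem

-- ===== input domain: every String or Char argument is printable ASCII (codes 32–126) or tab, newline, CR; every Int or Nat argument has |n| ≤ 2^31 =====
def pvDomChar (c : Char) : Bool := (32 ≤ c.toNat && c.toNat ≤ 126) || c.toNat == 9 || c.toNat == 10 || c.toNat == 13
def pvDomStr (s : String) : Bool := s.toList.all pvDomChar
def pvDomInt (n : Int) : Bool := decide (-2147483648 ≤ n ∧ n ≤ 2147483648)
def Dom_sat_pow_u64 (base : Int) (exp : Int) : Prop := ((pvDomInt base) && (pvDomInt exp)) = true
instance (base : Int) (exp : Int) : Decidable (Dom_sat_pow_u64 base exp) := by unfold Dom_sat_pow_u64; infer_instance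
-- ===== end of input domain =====

-- B replaces A's exponentiation-by-squaring with a closed form (trivial cases, guaranteed
-- saturation for base ≥ 2 and exp ≥ 64, else min(base^exp, U64_MAX)); objective: simpler.

-- ===== PORT A =====
def pvU64Max : Int := 18446744073709551615

def pvSatMul (a : Int) (b : Int) : Int :=
  let a := max 0 a
  let b := max 0 b
  let p := a * b
  if p > pvU64Max then pvU64Max else p

-- the while loop of A: power was clamped nonnegative on entry, so it is a Nat;
-- 'power >>= 1' is 'power / 2' on a nonnegative int, exact.
def pvSatPowLoop (result : Int) (factor : Int) (power : Nat) : Int :=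
  if power = 0 then result
  else
    let result := if power % 2 = 1 then pvSatMul result factor else result
    let power' := power / 2
    let factor := if power' > 0 then pvSatMul factor factor else factor
    pvSatPowLoop result factor power'
decreasing_by exact Nat.div_lt_self (Nat.pos_of_ne_zero (by assumption)) one_lt_two

def sat_pow_u64 (base : Int) (exp : Int) : Int :=
  pvSatPowLoop 1 (max 0 base) (max 0 exp).toNat

-- ===== PORT B =====
def sat_pow_u64_alt (base : Int) (exp : Int) : Int :=
  let b : Int := max 0 base
  let e : Nat := (max 0 exp).toNat
  if e = 0 then 1
  else if b ≤ 1 then b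
  else if e ≥ 64 then pvU64Max
  else min (b ^ e) pvU64Max

-- ===== PRECONDITION & SPEC =====
def Spec_sat_pow_u64 (base : Int) (exp : Int) (out : Int) : Prop := out = sat_pow_u64_alt base exp
instance (base : Int) (exp : Int) (out : Int) : Decidable (Spec_sat_pow_u64 base exp out) := by unfold Spec_sat_pow_u64; infer_instance

-- ===== CLAIM (what is proved, stated in full; the proofs are below) =====
def Claim_equal_sat_pow_u64 : Prop := ∀ (base : Int) (exp : Int), Dom_sat_pow_u64 base exp → Spec_sat_pow_u64 base exp (sat_pow_u64 base exp)

-- ===== LEMMAS AND PROOFS =====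

-- saturating multiplication of nonnegative ints is clamped multiplication
lemma pvSatMul_nonneg (a b : Int) (ha : 0 ≤ a) (hb : 0 ≤ b) :
    pvSatMul a b = min (a * b) pvU64Max := by
  simp only [pvSatMul, max_eq_right ha, max_eq_right hb]
  by_cases h : a * b ≤ pvU64Max
  · simp [not_lt.mpr h, min_eq_left h]
  · rw [not_le] at h
    simp [h, min_eq_right h.le]

-- multiplying two clamped powers of b saturates exactly like the clamped product power
lemma pvSatMul_pow (b : Int) (hb : 0 ≤ b) (s t : Nat) :
    pvSatMul (min (b ^ s) pvU64Max) (min (b ^ t) pvU64Max)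
      = min (b ^ (s + t)) pvU64Max := by
  have hM : (0:Int) < pvU64Max := by norm_num [pvU64Max]
  have h1M : (1:Int) ≤ pvU64Max := by norm_num [pvU64Max]
  have hs : 0 ≤ b ^ s := pow_nonneg hb s
  have ht : 0 ≤ b ^ t := pow_nonneg hb t
  rw [pvSatMul_nonneg _ _ (le_min hs hM.le) (le_min ht hM.le)]
  by_cases hb1 : 1 ≤ b
  case neg =>
    have hb0 : b = 0 := by omega
    subst hb0
    rcases Nat.eq_zero_or_pos s with rfl | hs0
    · rcases Nat.eq_zero_or_pos t with rfl | ht0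
      · norm_num [pvU64Max]
      · rw [zero_pow (by omega : t ≠ 0), pow_zero, zero_add,
          zero_pow (by omega : t ≠ 0)]
        norm_num [pvU64Max]
    · rcases Nat.eq_zero_or_pos t with rfl | ht0
      · rw [zero_pow (by omega : s ≠ 0), pow_zero, add_zero,
          zero_pow (by omega : s ≠ 0)]
        norm_num [pvU64Max]
      · rw [zero_pow (by omega : s ≠ 0), zero_pow (by omega : t ≠ 0),
          zero_pow (by omega : s + t ≠ 0)]
        norm_num [pvU64Max]
  case pos =>
    have h1s : (1:Int) ≤ b ^ s := one_le_pow₀ hb1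
    have h1t : (1:Int) ≤ b ^ t := one_le_pow₀ hb1
    by_cases hsM : b ^ s ≤ pvU64Max
    · by_cases htM : b ^ t ≤ pvU64Max
      · rw [min_eq_left hsM, min_eq_left htM, ← pow_add]
      · -- b^t > M : both sides are M
        rw [not_le] at htM
        rw [min_eq_left hsM, min_eq_right htM.le]
        have h2 : pvU64Max ≤ b ^ s * pvU64Max := le_mul_of_one_le_left hM.le h1s
        have h3 : pvU64Max < b ^ (s + t) := by
          calc pvU64Max < b ^ t := htM
            _ ≤ b ^ s * b ^ t := le_mul_of_one_le_left ht h1s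
            _ = b ^ (s + t) := (pow_add b s t).symm
        rw [min_eq_right h2, min_eq_right h3.le]
    · -- b^s > M : both sides are M
      rw [not_le] at hsM
      rw [min_eq_right hsM.le]
      have hy : (1:Int) ≤ min (b ^ t) pvU64Max := le_min h1t h1M
      have h2 : pvU64Max ≤ pvU64Max * min (b ^ t) pvU64Max := le_mul_of_one_le_right hM.le hy
      have h3 : pvU64Max < b ^ (s + t) := by
        calc pvU64Max < b ^ s := hsM
          _ ≤ b ^ s * b ^ t := le_mul_of_one_le_right hs h1t
          _ = b ^ (s + t) := (pow_add b s t).symm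
      rw [min_eq_right h2, min_eq_right h3.le]

-- loop invariant: state (min(b^s,M), min(b^t,M), p) computes min(b^(s+t*p), M)
lemma pvSatPowLoop_inv (b : Int) (hb : 0 ≤ b) :
    ∀ p s t, pvSatPowLoop (min (b ^ s) pvU64Max) (min (b ^ t) pvU64Max) p
      = min (b ^ (s + t * p)) pvU64Max := by
  intro p
  induction p using Nat.strong_induction_on with
  | _ p ih =>
    intro s t
    rcases Nat.eq_zero_or_pos p with rfl | hp
    · simp [pvSatPowLoop]
    · have hne : ¬ p = 0 := by omega
      rw [pvSatPowLoop]
      simp only [if_neg hne]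
      have hres : (if p % 2 = 1 then pvSatMul (min (b ^ s) pvU64Max) (min (b ^ t) pvU64Max)
          else min (b ^ s) pvU64Max) = min (b ^ (s + t * (p % 2))) pvU64Max := by
        rcases Nat.mod_two_eq_zero_or_one p with h | h <;> simp [h, pvSatMul_pow b hb]
      rw [hres]
      rcases Nat.eq_zero_or_pos (p / 2) with hp2 | hp2
      · have hp1 : p = 1 := by omega
        subst hp1
        simp [pvSatPowLoop]
      · rw [if_pos hp2, pvSatMul_pow b hb,
          ih (p / 2) (Nat.div_lt_self hp one_lt_two) (s + t * (p % 2)) (t + t)]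
        have hpp : p % 2 + 2 * (p / 2) = p := Nat.mod_add_div p 2
        have hx : s + t * (p % 2) + (t + t) * (p / 2) = s + t * p := by
          conv_rhs => rw [← hpp]
          ring
        rw [hx]

-- within the domain bound, A's loop result is the clamped power
lemma sat_pow_eq_min (base exp : Int) (hb : max 0 base ≤ pvU64Max) :
    sat_pow_u64 base exp = min ((max 0 base) ^ (max 0 exp).toNat) pvU64Max := by
  have hb0 : (0:Int) ≤ max 0 base := le_max_left 0 base
  have key := pvSatPowLoop_inv (max 0 base) hb0 (max 0 exp).toNat 0 1
  simp only [pow_zero, pow_one, zero_add, one_mul] at key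
  rw [min_eq_left (by norm_num [pvU64Max] : (1:Int) ≤ pvU64Max), min_eq_left hb] at key
  rw [sat_pow_u64, key]

theorem sat_pow_u64_spec_aux (base exp : Int)
    (hdom : max 0 base ≤ 2147483648) :
    sat_pow_u64 base exp = sat_pow_u64_alt base exp := by
  have hbM : max 0 base ≤ pvU64Max := le_trans hdom (by norm_num [pvU64Max])
  rw [sat_pow_eq_min base exp hbM, sat_pow_u64_alt]
  set b : Int := max 0 base with hbdef
  set e : Nat := (max 0 exp).toNat with hedef
  have hb0 : (0:Int) ≤ b := le_max_left 0 base
  have hM : (0:Int) < pvU64Max := by norm_num [pvU64Max]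
  by_cases he0 : e = 0
  · rw [if_pos he0, he0, pow_zero,
      min_eq_left (by norm_num [pvU64Max] : (1:Int) ≤ pvU64Max)]
  · rw [if_neg he0]
    by_cases hb1 : b ≤ 1
    · rw [if_pos hb1]
      interval_cases b
      · simp [zero_pow he0, min_eq_left hM.le]
      · simp only [one_pow]
        rw [min_eq_left (by norm_num [pvU64Max] : (1:Int) ≤ pvU64Max)]
    · rw [if_neg hb1]
      by_cases he64 : e ≥ 64
      · rw [if_pos he64]
        have h2 : (2:Int) ≤ b := by omega
        have : pvU64Max < b ^ e := by
          calc pvU64Max < 2 ^ (64:Nat) := by norm_num [pvU64Max]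
            _ ≤ 2 ^ e := pow_le_pow_right₀ (by norm_num) he64
            _ ≤ b ^ e := pow_le_pow_left₀ (by norm_num) h2 e
        rw [min_eq_right this.le]
      · rw [if_neg he64]

-- ===== VERDICT (by name: the statement is the Claim_ definition above) =====
theorem sat_pow_u64_spec : Claim_equal_sat_pow_u64 := by
  intro base exp hdom
  unfold Spec_sat_pow_u64
  have : max 0 base ≤ 2147483648 := by
    simp only [Dom_sat_pow_u64, pvDomInt, Bool.and_eq_true, decide_eq_true_eq] at hdom
    omega
  exact sat_pow_u64_spec_aux base exp this
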